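-- pv_equiv track=rewrite | github.com/pkolebski/hacking_101 | hack_power.py | hack_calculator
-- ===== SOURCE A (Python) =====
-- def hack_calculator(hack: str, _letters={'a': 1, 'b': 2, 'c': 3}, _phrases={'ba': 10, 'baa': 20}):
--     letters = _letters
--     phrases = _phrases
--     letter_error = False
--     points = 0
--
--     letters_occurrences = {letter: 0 for letter in letters}
--
--     for letter in hack:
--         if letter in letters:
--             letters_occurrences[letter] += 1
--             points += letters[letter] * letters_occurrences[letter]
--         else:
--             letter_error = True
--             points = 0
--             break
--
--     if letter_error:
--         return points
--
--     # Looking for a phrase in input string. Starting with most valuable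
--     for phrase, point in sorted(phrases.items(), key=lambda x: x[1], reverse=True):
--         index = hack.find(phrase)
--         while index >= 0:
--             points += point
--             hack = hack.replace(phrase, '_', 1)
--             index = hack.find(phrase)
--     return points
-- ===== SOURCE B (Python) =====
-- def hack_calculator(hack, _letters={'a': 1, 'b': 2, 'c': 3}, _phrases={'ba': 10, 'baa': 20}):
--     # validate first: any foreign character means score 0
--     if any(c not in _letters for c in hack):
--         return 0
--     # closed-form letter score: value * n*(n+1)/2 per letter occurring n times
--     counts = {}
--     for c in hack:
--         counts[c] = counts.get(c, 0) + 1
--     points = 0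
--     for c, n in counts.items():
--         points += _letters[c] * n * (n + 1) // 2
--     # phrase phase: most valuable first, remove occurrences one at a time
--     for phrase, point in sorted(_phrases.items(), key=lambda x: x[1], reverse=True):
--         while phrase in hack:
--             points += point
--             hack = hack.replace(phrase, '_', 1)
--     return points
-- ===== Notes on version B (the rewrite author's own statement) =====
-- stated objective: simpler
-- what changed: B validates the whole string up front instead of A's in-loop error flag/break, and replaces A's running occurrence-dict accumulator with a one-pass character counter plus the closed-form triangular score value*n*(n+1)//2 per letter; the phrase phase keeps A's most-valuable-first find/replace-1 order (required for exactness) but tests 'phrase in hack' instead of re-reading find's index.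
-- outside the precondition, e.g. on hack_calculator('', {}, {'_': 5}): A returns 0, B returns 0; on hack_calculator('a', {'a': 1}, {'_': 2}): A returns 1, B returns 1
import Mathlib
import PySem

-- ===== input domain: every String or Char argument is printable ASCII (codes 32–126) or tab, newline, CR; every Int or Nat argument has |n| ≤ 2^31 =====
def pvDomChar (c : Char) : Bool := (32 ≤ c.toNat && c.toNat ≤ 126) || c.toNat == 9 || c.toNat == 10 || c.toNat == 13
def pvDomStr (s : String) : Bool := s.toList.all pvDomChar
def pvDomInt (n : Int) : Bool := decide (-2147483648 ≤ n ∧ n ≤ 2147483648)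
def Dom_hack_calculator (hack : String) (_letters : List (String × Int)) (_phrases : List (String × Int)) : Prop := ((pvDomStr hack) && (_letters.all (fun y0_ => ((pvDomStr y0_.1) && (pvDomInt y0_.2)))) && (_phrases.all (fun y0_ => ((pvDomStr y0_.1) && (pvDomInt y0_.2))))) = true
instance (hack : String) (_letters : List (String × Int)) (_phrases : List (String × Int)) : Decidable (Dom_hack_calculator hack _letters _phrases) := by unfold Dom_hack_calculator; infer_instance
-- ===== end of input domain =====

-- B validates the string up front and scores letters by the closed-form triangular sum instead of A's
-- in-loop error flag and running occurrence accumulator; the phrase phase keeps A's order (objective: simpler).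

-- ===== PORT A =====
-- hand port of s.replace(old, new, 1): exact (Chars.find points at the first occurrence; find s [] = 0, so
-- an empty 'old' prepends 'new' exactly as Python does)
def pvReplace1 (s old new : List Char) : List Char :=
  let i := PySem.Chars.find s old
  if i < 0 then s else s.take i.toNat ++ new ++ s.drop (i.toNat + old.length)

-- A's inner 'while index >= 0' loop; the fuel only makes the recursion total (it is never exhausted on Pre_)
def pvWhileA (p : List Char) (pt : Int) : Nat → List Char × Int → List Char × Int
  | 0, st => st
  | f + 1, st =>
    if 0 ≤ PySem.Chars.find st.1 p then pvWhileA p pt f (pvReplace1 st.1 p ['_'], st.2 + pt)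
    else st

-- A's 'for letter in hack' loop with its break: state = (letter_error, letters_occurrences, points)
def pvLetterLoopA (L : PySem.Dict String Int) :
    List Char → PySem.Dict String Int → Int → Bool × PySem.Dict String Int × Int
  | [], occ, pts => (false, occ, pts)
  | c :: rest, occ, pts =>
    let s := String.singleton c
    if L.contains s then
      let occ' := occ.insert s (occ.getD s 0 + 1)
      pvLetterLoopA L rest occ' (pts + L.getD s 0 * occ'.getD s 0)
    else (true, occ, 0)

def hack_calculator (hack : String) (_letters : List (String × Int)) (_phrases : List (String × Int)) : Int :=
  let letters := PySem.Dict.ofList _letters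
  let phrases := PySem.Dict.ofList _phrases
  let occ0 := letters.keys.foldl (fun d k => d.insert k (0 : Int)) PySem.Dict.empty
  let r := pvLetterLoopA letters hack.toList occ0 0
  if r.1 then r.2.2
  else
    ((PySem.List.sorted phrases.items (fun x => x.2) true).foldl
      (fun st pv => pvWhileA pv.1.toList pv.2 (st.1.length + 1) st) (hack.toList, r.2.2)).2

-- ===== PORT B =====
-- B's inner "while phrase in hack" loop; same fuel discipline as A's
def pvWhileB (p : List Char) (pt : Int) : Nat → List Char × Int → List Char × Int
  | 0, st => st
  | f + 1, st =>
    if PySem.Chars.isIn p st.1 then pvWhileB p pt f (pvReplace1 st.1 p ['_'], st.2 + pt)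
    else st

def hack_calculator_alt (hack : String) (_letters : List (String × Int)) (_phrases : List (String × Int)) : Int :=
  let letters := PySem.Dict.ofList _letters
  let phrases := PySem.Dict.ofList _phrases
  let cs := hack.toList
  if cs.any (fun c => !(letters.contains (String.singleton c))) then 0
  else
    let counts := cs.foldl
      (fun d c => d.insert (String.singleton c) (d.getD (String.singleton c) 0 + 1)) PySem.Dict.empty
    let pts := counts.items.foldl
      (fun acc kn => acc + PySem.Int.floordiv (letters.getD kn.1 0 * kn.2 * (kn.2 + 1)) 2) 0
    ((PySem.List.sorted phrases.items (fun x => x.2) true).foldl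
      (fun st pv => pvWhileB pv.1.toList pv.2 (st.1.length + 1) st) (cs, pts)).2

-- ===== PRECONDITION & SPEC =====
-- Pre_ excludes inputs on which A's find/replace-1 loop can run forever: when every character of hack scores
-- (so the phrase loop is reached), no phrase key may be '' (found at every position forever) or '_' (A's own
-- replacement marker, which replaces itself without progress); the condition over-approximates slightly (a '_'
-- key that never meets a '_' terminates, and there A and B agree).
def Pre_hack_calculator (hack : String) (_letters : List (String × Int)) (_phrases : List (String × Int)) : Prop :=
  (hack.toList.all (fun c => _letters.any (fun p => p.1 == String.singleton c))) = true →
    (_phrases.all (fun pv => !(pv.1 == "") && !(pv.1 == "_"))) = true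
instance (hack : String) (_letters : List (String × Int)) (_phrases : List (String × Int)) : Decidable (Pre_hack_calculator hack _letters _phrases) := by unfold Pre_hack_calculator; infer_instance

def pvWitness_hack_calculator : String × (List (String × Int)) × (List (String × Int)) :=
  ("aba", [("a", 1), ("b", 2), ("c", 3)], [("ba", 10), ("baa", 20)])

def Spec_hack_calculator (hack : String) (_letters : List (String × Int)) (_phrases : List (String × Int)) (out : Int) : Prop := out = hack_calculator_alt hack _letters _phrases
instance (hack : String) (_letters : List (String × Int)) (_phrases : List (String × Int)) (out : Int) : Decidable (Spec_hack_calculator hack _letters _phrases out) := by unfold Spec_hack_calculator; infer_instance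

-- ===== CLAIM (what is proved, stated in full; the proofs are below) =====
def Claim_equal_hack_calculator : Prop := ∀ (hack : String) (_letters : List (String × Int)) (_phrases : List (String × Int)), Dom_hack_calculator hack _letters _phrases → Pre_hack_calculator hack _letters _phrases → Spec_hack_calculator hack _letters _phrases (hack_calculator hack _letters _phrases)

-- ===== LEMMAS AND PROOFS =====

-- the two inner while loops compute the same thing ('index >= 0' vs 'phrase in hack')
theorem pvWhile_eq (p : List Char) (pt : Int) (f : Nat) (st : List Char × Int) :
    pvWhileA p pt f st = pvWhileB p pt f st := by
  induction f generalizing st with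
  | zero => rfl
  | succ f ih =>
    simp only [pvWhileA, pvWhileB]
    by_cases h : p <:+: st.1
    · rw [if_pos ((PySem.Chars.find_nonneg_iff st.1 p).mpr h),
        if_pos ((PySem.Chars.isIn_iff_infix p st.1).mpr h)]
      exact ih _
    · rw [if_neg (fun hc => h ((PySem.Chars.find_nonneg_iff st.1 p).mp hc)),
        if_neg (by simpa [PySem.Chars.isIn_iff_infix] using h)]

-- the zero-initialised occurrence dict looks up to 0 everywhere
theorem pvOcc0_getD (ks : List String) (d : PySem.Dict String Int)
    (hd : ∀ s, d.getD s 0 = 0) (s : String) :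
    (ks.foldl (fun d k => d.insert k (0 : Int)) d).getD s 0 = 0 := by
  induction ks generalizing d with
  | nil => exact hd s
  | cons k ks ih =>
    refine ih _ (fun t => ?_)
    rw [PySem.Dict.getD_insert]
    split <;> simp [hd]

theorem pvLoopA_invalid (L : PySem.Dict String Int) (l : List Char)
    (occ : PySem.Dict String Int) (pts : Int)
    (h : l.any (fun c => !(L.contains (String.singleton c))) = true) :
    (pvLetterLoopA L l occ pts).1 = true ∧ (pvLetterLoopA L l occ pts).2.2 = 0 := by
  induction l generalizing occ pts with
  | nil => simp at h
  | cons c rest ih =>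
    simp only [List.any_cons, Bool.or_eq_true, Bool.not_eq_true'] at h
    simp only [pvLetterLoopA]
    by_cases hc : L.contains (String.singleton c) = true
    · rw [if_pos hc]
      rcases h with h | h
      · exact absurd hc (by simp [h])
      · exact ih _ _ h
    · rw [if_neg hc]; exact ⟨rfl, rfl⟩

theorem pvLoopA_fst (L : PySem.Dict String Int) (l : List Char)
    (occ : PySem.Dict String Int) (pts : Int)
    (h : ∀ c ∈ l, L.contains (String.singleton c) = true) :
    (pvLetterLoopA L l occ pts).1 = false := by
  induction l generalizing occ pts with
  | nil => rfl
  | cons c rest ih =>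
    simp only [pvLetterLoopA]
    rw [if_pos (h c (List.mem_cons_self ..))]
    exact ih _ _ (fun x hx => h x (List.mem_cons_of_mem _ hx))

theorem pvLoopA_occ (L : PySem.Dict String Int) (l : List Char)
    (occ : PySem.Dict String Int) (pts : Int)
    (h : ∀ c ∈ l, L.contains (String.singleton c) = true) :
    (pvLetterLoopA L l occ pts).2.1 =
      (l.map String.singleton).foldl (fun d x => d.insert x (d.getD x 0 + 1)) occ := by
  induction l generalizing occ pts with
  | nil => rfl
  | cons c rest ih =>
    simp only [pvLetterLoopA, List.map_cons, List.foldl_cons]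
    rw [if_pos (h c (List.mem_cons_self ..))]
    exact ih _ _ (fun x hx => h x (List.mem_cons_of_mem _ hx))

theorem pvLoopA_append (L : PySem.Dict String Int) (l₁ l₂ : List Char)
    (occ : PySem.Dict String Int) (pts : Int)
    (h : ∀ c ∈ l₁, L.contains (String.singleton c) = true) :
    pvLetterLoopA L (l₁ ++ l₂) occ pts =
      pvLetterLoopA L l₂ (pvLetterLoopA L l₁ occ pts).2.1 (pvLetterLoopA L l₁ occ pts).2.2 := by
  induction l₁ generalizing occ pts with
  | nil => rfl
  | cons c rest ih =>
    simp only [List.cons_append, pvLetterLoopA]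
    rw [if_pos (h c (List.mem_cons_self ..)), if_pos (h c (List.mem_cons_self ..))]
    exact ih _ _ (fun x hx => h x (List.mem_cons_of_mem _ hx))

-- the closed-form term B adds for a letter with value v occurring n times
def pvTri (v n : Int) : Int := PySem.Int.floordiv (v * n * (n + 1)) 2

theorem pvTri_succ (v : Int) (n : Nat) :
    pvTri v ((n : Int) + 1) = pvTri v (n : Int) + v * ((n : Int) + 1) := by
  obtain ⟨k, hk⟩ := Int.even_mul_succ_self (n : Int)
  unfold pvTri
  rw [PySem.Int.floordiv_eq_ediv_of_pos (by norm_num),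
      PySem.Int.floordiv_eq_ediv_of_pos (by norm_num)]
  have h1 : v * (n : Int) * ((n : Int) + 1) = 2 * (v * k) := by linear_combination v * hk
  have h2 : v * ((n : Int) + 1) * (((n : Int) + 1) + 1) = 2 * (v * k + v * ((n : Int) + 1)) := by
    linear_combination v * hk
  rw [h1, h2, Int.mul_ediv_cancel_left _ (by norm_num), Int.mul_ediv_cancel_left _ (by norm_num)]

-- B's letter score over the string l
def pvBsum (L : PySem.Dict String Int) (l : List Char) : Int :=
  ((PySem.Set.ofList (l.map String.singleton)).map
    (fun k => pvTri (L.getD k 0) ((l.map String.singleton).count k : Int))).sum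

theorem pvSet_ofList_snoc {α : Type} [BEq α] [LawfulBEq α] (ls : List α) (s : α) :
    PySem.Set.ofList (ls ++ [s]) =
      if s ∈ ls then PySem.Set.ofList ls else PySem.Set.ofList ls ++ [s] := by
  rw [PySem.Set.ofList_eq_foldl, List.foldl_append, ← PySem.Set.ofList_eq_foldl]
  by_cases hs : s ∈ ls
  · simp [PySem.Set.add, hs, (PySem.Set.mem_ofList ls s).mpr hs]
  · simp only [List.foldl_cons, List.foldl_nil, PySem.Set.add, if_neg hs]
    rw [if_neg (by simpa [PySem.Set.mem_ofList] using hs)]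

theorem pvBsum_snoc (L : PySem.Dict String Int) (l : List Char) (c : Char) :
    pvBsum L (l ++ [c]) = pvBsum L l +
      L.getD (String.singleton c) 0 *
        (((l.map String.singleton).count (String.singleton c) : Int) + 1) := by
  have hcount : ∀ k, (l.map String.singleton ++ [String.singleton c]).count k =
      (l.map String.singleton).count k + (if (String.singleton c) = k then 1 else 0) := by
    intro k
    simp [List.count_append, List.count_singleton]
  unfold pvBsum
  rw [List.map_append, List.map_singleton, pvSet_ofList_snoc]
  by_cases hs : String.singleton c ∈ l.map String.singleton
  · rw [if_pos hs]
    have hsS : String.singleton c ∈ PySem.Set.ofList (l.map String.singleton) :=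
      (PySem.Set.mem_ofList _ _).mpr hs
    have hnd := PySem.Set.nodup_ofList (l.map String.singleton)
    have hp := List.perm_cons_erase hsS
    rw [(hp.map (fun k => pvTri (L.getD k 0)
          (((l.map String.singleton ++ [String.singleton c]).count k : Int)))).sum_eq,
        (hp.map (fun k => pvTri (L.getD k 0)
          (((l.map String.singleton).count k : Int)))).sum_eq]
    simp only [List.map_cons, List.sum_cons]
    have htail : ∀ k ∈ (PySem.Set.ofList (l.map String.singleton)).erase (String.singleton c),
        pvTri (L.getD k 0) (((l.map String.singleton ++ [String.singleton c]).count k : Int)) =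
        pvTri (L.getD k 0) (((l.map String.singleton).count k : Int)) := by
      intro k hk
      have hne := (hnd.mem_erase_iff.mp hk).1
      rw [hcount k, if_neg (fun he => hne he.symm)]
      simp
    rw [List.map_congr_left htail, hcount (String.singleton c), if_pos rfl]
    push_cast
    rw [pvTri_succ]
    ring
  · rw [if_neg hs]
    have hc0 : (l.map String.singleton).count (String.singleton c) = 0 :=
      List.count_eq_zero.mpr hs
    have hhead : ∀ k ∈ PySem.Set.ofList (l.map String.singleton),
        pvTri (L.getD k 0) (((l.map String.singleton ++ [String.singleton c]).count k : Int)) =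
        pvTri (L.getD k 0) (((l.map String.singleton).count k : Int)) := by
      intro k hk
      have hkm := (PySem.Set.mem_ofList _ _).mp hk
      rw [hcount k, if_neg (fun he => hs (by rw [he]; exact hkm))]
      simp
    have h1 : pvTri (L.getD (String.singleton c) 0)
        (((l.map String.singleton ++ [String.singleton c]).count (String.singleton c) : Int)) =
        L.getD (String.singleton c) 0 := by
      rw [hcount (String.singleton c), if_pos rfl, hc0]
      norm_num [pvTri, PySem.Int.floordiv]
    rw [List.map_append, List.map_singleton, List.sum_append, List.sum_singleton,
        List.map_congr_left hhead, h1, hc0]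
    ring

theorem pvMain (L : PySem.Dict String Int) (l : List Char)
    (occ0 : PySem.Dict String Int) (h0 : ∀ s, occ0.getD s 0 = 0)
    (h : ∀ c ∈ l, L.contains (String.singleton c) = true) :
    (pvLetterLoopA L l occ0 0).2.2 = pvBsum L l := by
  induction l using List.reverseRecOn with
  | nil => simp [pvLetterLoopA, pvBsum, PySem.Set.ofList]
  | append_singleton l c ih =>
    have hl : ∀ x ∈ l, L.contains (String.singleton x) = true :=
      fun x hx => h x (List.mem_append_left _ hx)
    have hc : L.contains (String.singleton c) = true :=
      h c (List.mem_append_right _ (List.mem_singleton_self c))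
    rw [pvLoopA_append L l [c] occ0 0 hl]
    simp only [pvLetterLoopA, if_pos hc]
    rw [PySem.Dict.getD_insert]
    rw [if_pos rfl]
    rw [pvLoopA_occ L l occ0 0 hl, PySem.Dict.getD_foldl_insert_add_one,
        h0 (String.singleton c), ih hl, pvBsum_snoc]
    ring

-- ===== VERDICT (by name: the statement is the Claim_ definition above) =====
theorem hack_calculator_spec : Claim_equal_hack_calculator := by
  intro hack _letters _phrases _hdom _hpre
  unfold Spec_hack_calculator
  simp only [hack_calculator, hack_calculator_alt]
  by_cases hv : ∀ c ∈ hack.toList,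
      (PySem.Dict.ofList _letters).contains (String.singleton c) = true
  · -- every character scores
    have hany : (hack.toList.any
        (fun c => !((PySem.Dict.ofList _letters).contains (String.singleton c)))) = false := by
      simp only [List.any_eq_false, Bool.not_eq_true']
      intro c hc
      simpa using hv c hc
    rw [if_neg (by simp [pvLoopA_fst _ _ _ _ hv]), if_neg (by simp [hany])]
    have hfun : (fun (st : List Char × Int) (pv : String × Int) =>
          pvWhileA pv.1.toList pv.2 (st.1.length + 1) st) =
        (fun (st : List Char × Int) (pv : String × Int) =>
          pvWhileB pv.1.toList pv.2 (st.1.length + 1) st) := by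
      funext st pv; exact pvWhile_eq _ _ _ _
    rw [hfun]
    have hcounts : hack.toList.foldl
        (fun d c => d.insert (String.singleton c) (d.getD (String.singleton c) 0 + 1))
        PySem.Dict.empty = PySem.Dict.counter (hack.toList.map String.singleton) := by
      rw [← PySem.Dict.foldl_insert_getD_add_one_eq_counter, List.foldl_map]
    rw [hcounts, PySem.Dict.items_counter, List.foldl_map, PySem.List.foldl_add,
        pvMain _ _ _ (fun s => pvOcc0_getD _ _ (fun t => PySem.Dict.getD_empty t 0) s) hv]
    simp [pvBsum, pvTri]
  · -- some character does not score: both sides return 0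
    have hany : (hack.toList.any
        (fun c => !((PySem.Dict.ofList _letters).contains (String.singleton c)))) = true := by
      push Not at hv
      obtain ⟨c, hc, hcc⟩ := hv
      exact List.any_eq_true.mpr ⟨c, hc, by simpa using hcc⟩
    obtain ⟨h1, h2⟩ := pvLoopA_invalid (PySem.Dict.ofList _letters) hack.toList _ 0 hany
    rw [if_pos h1, h2, if_pos hany]
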